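-- pv_equiv track=rewrite | github.com/wmboyles/NCAA-Predictions | ncaa_pagerank.py | build_tourney
-- ===== SOURCE A (Python) =====
-- def build_tourney(rankings: list) -> list:
--     """
--     Given a list of teams in ranked order, reorder them in NCAA bracket format.
--     NCAA Bracket Format:
--     1) In any list of teams of length L the #1 ranked team should play the #L ranked team in the first round
--     2) In any list of teams, the 1st and 2nd best teams shouldn't play each other until the final round.
--     """
--     if len(rankings) <= 1:
--         return rankings
--
--     left_rankings, right_rankings = [], []
--
--     # pointer to current tourney we're building
--     cur = left_rankings
--
--     # We start by adding the top team to the first half, then add the second and third teams to the second half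
--     side_adds = 1
--     for seed in rankings:
--         cur.append(seed)
--
--         side_adds += 1
--
--         if side_adds >= 2:
--             if cur is left_rankings:
--                 cur = right_rankings
--             else:
--                 cur = left_rankings
--             side_adds = 0
--
--     tourney = build_tourney(left_rankings) + build_tourney(right_rankings)
--     return tourney
--
-- tourney = []
-- ===== SOURCE B (Python) =====
-- def _f(m):
--     # number of indices i in [0, m) that go to the left half:
--     # the left/right pattern has period 4: L R R L
--     return 2 * (m // 4) + (1 if m % 4 >= 1 else 0)
--
--
-- def _idx(p, m):
--     """Original index (within a group of size m) of the element that ends up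
--     at output position p of that group, computed by arithmetic descent."""
--     if m <= 1:
--         return 0
--     left = _f(m)
--     if p < left:
--         j = _idx(p, left)
--         return 2 * j + j % 2          # p-th left index is 2p + p%2
--     j = _idx(p - left, m - left)
--     return 2 * j + 1 - j % 2          # p-th right index is 2p + 1 - p%2
--
--
-- def build_tourney(rankings: list) -> list:
--     n = len(rankings)
--     return [rankings[_idx(p, n)] for p in range(n)]
-- ===== Notes on version B (the rewrite author's own statement) =====
-- stated objective: alternative
-- what changed: A recursively splits the list into two halves with a stateful pointer-toggling loop and concatenates recursive results; B is a single map that computes, for each output position, the source index directly by an arithmetic descent (period-4 half-size formula), with no intermediate lists.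
import Mathlib
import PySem

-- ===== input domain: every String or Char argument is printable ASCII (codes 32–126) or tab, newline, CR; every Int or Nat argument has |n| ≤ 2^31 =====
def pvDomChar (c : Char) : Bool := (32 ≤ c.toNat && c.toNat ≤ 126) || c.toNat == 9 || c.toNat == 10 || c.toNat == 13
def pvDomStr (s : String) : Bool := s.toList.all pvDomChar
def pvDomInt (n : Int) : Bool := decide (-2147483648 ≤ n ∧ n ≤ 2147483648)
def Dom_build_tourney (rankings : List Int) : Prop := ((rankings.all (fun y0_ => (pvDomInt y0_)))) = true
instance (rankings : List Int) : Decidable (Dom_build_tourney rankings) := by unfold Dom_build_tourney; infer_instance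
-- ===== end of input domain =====

-- B replaces A's recursive split-and-concatenate with a one-pass map that computes each
-- output position's source index by an arithmetic descent (objective: alternative).

-- ===== PORT A =====
-- the for-loop of A: state = (left_rankings, right_rankings, cur-is-left, side_adds)
def btLoop : List Int → List Int → List Int → Bool → Int → List Int × List Int
  | [], L, R, _, _ => (L, R)
  | s :: rest, L, R, curLeft, sideAdds =>
    let L' := if curLeft then L ++ [s] else L
    let R' := if curLeft then R else R ++ [s]
    if sideAdds + 1 ≥ 2 then btLoop rest L' R' (!curLeft) 0
    else btLoop rest L' R' curLeft (sideAdds + 1)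

-- A's recursion, with a fuel counter as totality guard only: each recursive call is on a
-- strictly shorter list, so fuel = rankings.length never runs out (fuel 0 is unreachable)
def btGo : Nat → List Int → List Int
  | 0, xs => xs
  | fuel + 1, xs =>
    if xs.length ≤ 1 then xs
    else
      let p := btLoop xs [] [] true 1
      btGo fuel p.1 ++ btGo fuel p.2

def build_tourney (rankings : List Int) : List Int := btGo rankings.length rankings

-- ===== PORT B =====
-- _f: how many of the first m indices go to the left half (pattern L R R L, period 4)
def fHalf (m : Nat) : Nat := 2 * (m / 4) + (if 1 ≤ m % 4 then 1 else 0)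

-- _idx: arithmetic descent computing the source index of output position p in a group of
-- size m; fuel is a totality guard only (m shrinks at every call, so fuel = m suffices)
def idxGo : Nat → Nat → Nat → Nat
  | 0, _, _ => 0
  | fuel + 1, p, m =>
    if m ≤ 1 then 0
    else
      let L := fHalf m
      if p < L then
        let j := idxGo fuel p L
        2 * j + j % 2
      else
        let j := idxGo fuel (p - L) (m - L)
        2 * j + 1 - j % 2

def idxB (p m : Nat) : Nat := idxGo m p m

-- B indexes rankings[idxB p n] with 0 ≤ idxB p n < n (proved in idxB_lt below), where
-- Python's rankings[i] and getD agree exactly.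
def build_tourney_alt (rankings : List Int) : List Int :=
  (List.range rankings.length).map (fun p => rankings.getD (idxB p rankings.length) 0)

-- ===== PRECONDITION & SPEC =====
def Spec_build_tourney (rankings : List Int) (out : List Int) : Prop := out = build_tourney_alt rankings
instance (rankings : List Int) (out : List Int) : Decidable (Spec_build_tourney rankings out) := by unfold Spec_build_tourney; infer_instance

-- ===== CLAIM (what is proved, stated in full; the proofs are below) =====
def Claim_equal_build_tourney : Prop := ∀ (rankings : List Int), Dom_build_tourney rankings → Spec_build_tourney rankings (build_tourney rankings)

-- ===== LEMMAS AND PROOFS =====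

-- left/right membership pattern of A's loop, as a predicate on the 0-based index
def isLeftIdx (k : Nat) : Bool := ((k + 1) / 2) % 2 == 0

-- functional restatement of the split A's loop performs, starting at index k
def pick : List Int → Nat → List Int × List Int
  | [], _ => ([], [])
  | x :: t, k =>
    let pr := pick t (k + 1)
    if isLeftIdx k then (x :: pr.1, pr.2) else (pr.1, x :: pr.2)

theorem btLoop_pick : ∀ (xs : List Int) (k : Nat) (L R : List Int),
    btLoop xs L R (decide (k % 4 = 0 ∨ k % 4 = 3)) (if k % 4 = 0 ∨ k % 4 = 2 then 1 else 0)
      = (L ++ (pick xs k).1, R ++ (pick xs k).2) := by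
  intro xs
  induction xs with
  | nil => intro k L R; simp [btLoop, pick]
  | cons x t ih =>
    intro k L R
    have h4 : k % 4 = 0 ∨ k % 4 = 1 ∨ k % 4 = 2 ∨ k % 4 = 3 := by omega
    rcases h4 with hk | hk | hk | hk
    · have hl : isLeftIdx k = true := by simp [isLeftIdx]; omega
      have h1 : (k + 1) % 4 = 1 := by omega
      have := ih (k + 1) (L ++ [x]) R
      simp only [h1] at this
      norm_num at this
      simp only [hk]
      norm_num [btLoop]
      rw [this]
      simp [pick, hl]
    · have hl : isLeftIdx k = false := by simp [isLeftIdx]; omega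
      have h1 : (k + 1) % 4 = 2 := by omega
      have := ih (k + 1) L (R ++ [x])
      simp only [h1] at this
      norm_num at this
      simp only [hk]
      norm_num [btLoop]
      rw [this]
      simp [pick, hl]
    · have hl : isLeftIdx k = false := by simp [isLeftIdx]; omega
      have h1 : (k + 1) % 4 = 3 := by omega
      have := ih (k + 1) L (R ++ [x])
      simp only [h1] at this
      norm_num at this
      simp only [hk]
      norm_num [btLoop]
      rw [this]
      simp [pick, hl]
    · have hl : isLeftIdx k = true := by simp [isLeftIdx]; omega
      have h1 : (k + 1) % 4 = 0 := by omega
      have := ih (k + 1) (L ++ [x]) R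
      simp only [h1] at this
      norm_num at this
      simp only [hk]
      norm_num [btLoop]
      rw [this]
      simp [pick, hl]

theorem btLoop_start (xs : List Int) :
    btLoop xs [] [] true 1 = ((pick xs 0).1, (pick xs 0).2) := by
  have := btLoop_pick xs 0 [] []
  norm_num at this
  exact this

theorem fHalf_lt (m : Nat) (h : 2 ≤ m) : fHalf m < m := by
  unfold fHalf; split <;> omega

theorem fHalf_pos (m : Nat) (h : 1 ≤ m) : 1 ≤ fHalf m := by
  unfold fHalf; split <;> omega

theorem fHalf_le (n : Nat) : fHalf n ≤ n := by
  unfold fHalf; split <;> omega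

theorem fHalf_succ (n : Nat) :
    fHalf (n + 1) = fHalf n + (if isLeftIdx n then 1 else 0) := by
  unfold fHalf isLeftIdx
  by_cases h : (n + 1) / 2 % 2 = 0 <;> simp [h] <;> split_ifs <;> omega

theorem leftEnum (n : Nat) (h : (n + 1) / 2 % 2 = 0) :
    2 * fHalf n + fHalf n % 2 = n := by
  unfold fHalf; split <;> omega

theorem rightEnum (n : Nat) (h : (n + 1) / 2 % 2 ≠ 0) :
    2 * (n - fHalf n) + 1 - (n - fHalf n) % 2 = n := by
  unfold fHalf; split <;> omega

theorem gBound (m j : Nat) (hj : j < fHalf m) : 2 * j + j % 2 < m := by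
  unfold fHalf at hj; split at hj <;> omega

theorem hBound (m j : Nat) (hj : j < m - fHalf m) : 2 * j + 1 - j % 2 < m := by
  unfold fHalf at hj; split at hj <;> omega

theorem filterL (n : Nat) :
    (List.range n).filter (fun i => isLeftIdx i)
      = (List.range (fHalf n)).map (fun j => 2 * j + j % 2) := by
  induction n with
  | zero => simp [fHalf]
  | succ n ih =>
    rw [List.range_succ, List.filter_append, ih, fHalf_succ]
    by_cases hn : isLeftIdx n = true
    · have hh : (n + 1) / 2 % 2 = 0 := by simpa [isLeftIdx] using hn
      simp [hn, List.range_succ, leftEnum n hh]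
    · simp at hn
      simp [hn]

theorem filterR (n : Nat) :
    (List.range n).filter (fun i => !isLeftIdx i)
      = (List.range (n - fHalf n)).map (fun j => 2 * j + 1 - j % 2) := by
  induction n with
  | zero => simp [fHalf]
  | succ n ih =>
    rw [List.range_succ, List.filter_append, ih]
    have hle := fHalf_le n
    by_cases hn : isLeftIdx n = true
    · have h1 : fHalf (n + 1) = fHalf n + 1 := by rw [fHalf_succ, hn]; simp
      have h2 : n + 1 - fHalf (n + 1) = n - fHalf n := by omega
      simp [hn, h2]
    · simp only [Bool.not_eq_true] at hn
      have hh : (n + 1) / 2 % 2 ≠ 0 := by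
        intro h; rw [show isLeftIdx n = true from by simpa [isLeftIdx] using h] at hn; simp at hn
      have h1 : fHalf (n + 1) = fHalf n := by rw [fHalf_succ, hn]; simp
      have h2 : n + 1 - fHalf (n + 1) = (n - fHalf n) + 1 := by omega
      simp [hn, h2, List.range_succ, rightEnum n hh]

theorem pick_fst_snd : ∀ (xs : List Int) (k : Nat),
    (pick xs k).1 = ((List.range xs.length).filter (fun i => isLeftIdx (k + i))).map (fun i => xs.getD i 0)
  ∧ (pick xs k).2 = ((List.range xs.length).filter (fun i => !isLeftIdx (k + i))).map (fun i => xs.getD i 0) := by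
  intro xs
  induction xs with
  | nil => intro k; simp [pick]
  | cons x t ih =>
    intro k
    have hsh : (fun i => isLeftIdx (k + Nat.succ i)) = (fun i => isLeftIdx ((k + 1) + i)) := by
      funext i; congr 1; omega
    have hsh2 : (fun i => !isLeftIdx (k + Nat.succ i)) = (fun i => !isLeftIdx ((k + 1) + i)) := by
      funext i; congr 2; omega
    obtain ⟨ih1, ih2⟩ := ih (k + 1)
    rw [List.length_cons, List.range_succ_eq_map]
    constructor <;>
    · simp only [pick, List.filter_cons, List.filter_map, Function.comp_def, hsh, hsh2,
        Nat.add_zero]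
      by_cases hk : isLeftIdx k = true <;>
        simp [hk, ih1, ih2, Function.comp_def]

theorem pick_fst (xs : List Int) :
    (pick xs 0).1 = (List.range (fHalf xs.length)).map (fun j => xs.getD (2 * j + j % 2) 0) := by
  have h := (pick_fst_snd xs 0).1
  simp only [Nat.zero_add] at h
  rw [h, filterL, List.map_map]
  rfl

theorem pick_snd (xs : List Int) :
    (pick xs 0).2 = (List.range (xs.length - fHalf xs.length)).map (fun j => xs.getD (2 * j + 1 - j % 2) 0) := by
  have h := (pick_fst_snd xs 0).2
  simp only [Nat.zero_add] at h
  rw [h, filterR, List.map_map]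
  rfl

theorem idxGo_irrel : ∀ (f f' p m : Nat), m ≤ f → m ≤ f' → idxGo f p m = idxGo f' p m := by
  intro f
  induction f with
  | zero =>
    intro f' p m h h'
    have : m = 0 := by omega
    subst this
    cases f' <;> simp [idxGo]
  | succ f ih =>
    intro f' p m h h'
    by_cases h1 : m ≤ 1
    · cases f' <;> simp [idxGo, h1]
    · rcases f' with _ | f'
      · omega
      have hL1 : 1 ≤ fHalf m := fHalf_pos m (by omega)
      have hLm : fHalf m < m := fHalf_lt m (by omega)
      simp only [idxGo, if_neg h1]
      rw [ih f' p (fHalf m) (by omega) (by omega),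
          ih f' (p - fHalf m) (m - fHalf m) (by omega) (by omega)]

theorem idxB_unfold (p m : Nat) (h : 2 ≤ m) :
    idxB p m = if p < fHalf m then 2 * idxB p (fHalf m) + idxB p (fHalf m) % 2
               else 2 * idxB (p - fHalf m) (m - fHalf m) + 1 - idxB (p - fHalf m) (m - fHalf m) % 2 := by
  have hL1 : 1 ≤ fHalf m := fHalf_pos m (by omega)
  have hLm : fHalf m < m := fHalf_lt m (by omega)
  unfold idxB
  rcases m with _ | m
  · omega
  simp only [idxGo, if_neg (show ¬ m + 1 ≤ 1 by omega)]
  rw [idxGo_irrel m (fHalf (m + 1)) p (fHalf (m + 1)) (by omega) (by omega),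
      idxGo_irrel m (m + 1 - fHalf (m + 1)) (p - fHalf (m + 1)) (m + 1 - fHalf (m + 1)) (by omega) (by omega)]

theorem idxB_lt : ∀ (m p : Nat), p < m → idxB p m < m := by
  intro m
  induction m using Nat.strong_induction_on with
  | _ m ih =>
    intro p hp
    by_cases h1 : m ≤ 1
    · unfold idxB
      rcases m with _ | m
      · omega
      · simp [idxGo, h1]
    · have hLm : fHalf m < m := fHalf_lt m (by omega)
      have hL1 : 1 ≤ fHalf m := fHalf_pos m (by omega)
      rw [idxB_unfold p m (by omega)]
      by_cases hpl : p < fHalf m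
      · simp only [if_pos hpl]
        exact gBound m _ (ih (fHalf m) hLm p hpl)
      · simp only [if_neg hpl]
        exact hBound m _ (ih (m - fHalf m) (by omega) _ (by omega))

theorem map_range_split {α : Type} (F : Nat → α) (a b : Nat) :
    (List.range (a + b)).map F = (List.range a).map F ++ (List.range b).map (fun q => F (a + q)) := by
  rw [List.range_add, List.map_append, List.map_map]
  rfl

theorem main_eq : ∀ (fuel : Nat) (xs : List Int), xs.length ≤ fuel →
    btGo fuel xs = (List.range xs.length).map (fun p => xs.getD (idxB p xs.length) 0) := by
  intro fuel
  induction fuel with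
  | zero =>
    intro xs h
    have : xs = [] := by
      cases xs
      · rfl
      · simp at h
    subst this
    simp [btGo]
  | succ fuel ih =>
    intro xs hfuel
    by_cases h1 : xs.length ≤ 1
    · simp only [btGo, if_pos h1]
      rcases xs with _ | ⟨x, _ | _⟩ <;> simp_all
      unfold idxB
      simp [idxGo]
    · have hn2 : 2 ≤ xs.length := by omega
      have hLlt : fHalf xs.length < xs.length := fHalf_lt _ hn2
      have hL1 : 1 ≤ fHalf xs.length := fHalf_pos _ (by omega)
      set n := xs.length with hn
      simp only [btGo]
      rw [btLoop_start]
      have hlen1 : (pick xs 0).1.length = fHalf n := by rw [pick_fst]; simp; rw [← hn]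
      have hlen2 : (pick xs 0).2.length = n - fHalf n := by rw [pick_snd]; simp; rw [← hn]
      rw [ih (pick xs 0).1 (by rw [hlen1]; omega), ih (pick xs 0).2 (by rw [hlen2]; omega), hlen1, hlen2,
          pick_fst, pick_snd, ← hn]
      have hleft : ∀ p ∈ List.range (fHalf n),
          ((List.range (fHalf n)).map (fun j => xs.getD (2 * j + j % 2) 0)).getD (idxB p (fHalf n)) 0
            = xs.getD (idxB p n) 0 := by
        intro p hp
        rw [List.mem_range] at hp
        rw [PySem.List.getD_map_range _ _ _ _ (idxB_lt (fHalf n) p hp)]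
        rw [idxB_unfold p n hn2, if_pos hp]
      have hright : ∀ q ∈ List.range (n - fHalf n),
          ((List.range (n - fHalf n)).map (fun j => xs.getD (2 * j + 1 - j % 2) 0)).getD (idxB q (n - fHalf n)) 0
            = xs.getD (idxB (fHalf n + q) n) 0 := by
        intro q hq
        rw [List.mem_range] at hq
        rw [PySem.List.getD_map_range _ _ _ _ (idxB_lt (n - fHalf n) q hq)]
        rw [idxB_unfold (fHalf n + q) n hn2,
            if_neg (show ¬ fHalf n + q < fHalf n by omega)]
        simp only [Nat.add_sub_cancel_left]
      rw [List.map_congr_left hleft, List.map_congr_left hright]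
      have hsplit := map_range_split (fun p => xs.getD (idxB p n) 0) (fHalf n) (n - fHalf n)
      rw [show fHalf n + (n - fHalf n) = n from by omega] at hsplit
      rw [hsplit, if_neg h1]

-- ===== VERDICT (by name: the statement is the Claim_ definition above) =====
theorem build_tourney_spec : Claim_equal_build_tourney := by
  intro rankings _
  unfold Spec_build_tourney build_tourney_alt build_tourney
  exact main_eq rankings.length rankings le_rfl
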